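-- pv_equiv track=rewrite | github.com/joimpingporsche/edc | edc/preprocessing/chunking_v2.py | _split_groups_by_char_limit
-- ===== SOURCE A (Python) =====
-- from typing import Any, Dict, List
--
-- def _split_groups_by_char_limit(lines: List[str], max_chars: int, overlap_items: int = 1) -> List[List[str]]:
-- 	groups = []
-- 	i = 0
-- 	while i < len(lines):
-- 		current = []
-- 		current_len = 0
-- 		j = i
-- 		while j < len(lines):
-- 			candidate = lines[j]
-- 			add_len = len(candidate) + (1 if current else 0)
-- 			if current and current_len + add_len > max_chars:
-- 				break
-- 			current.append(candidate)
-- 			current_len += add_len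
-- 			j += 1
--
-- 		if current:
-- 			groups.append(current)
--
-- 		if j >= len(lines):
-- 			break
--
-- 		i = max(i + 1, j - max(0, overlap_items))
-- 	return groups
-- ===== SOURCE B (Python) =====
-- from typing import List
--
--
-- def _split_groups_by_char_limit(lines: List[str], max_chars: int, overlap_items: int = 1) -> List[List[str]]:
--     n = len(lines)
--     # prefix sums: pref[k] = sum(len(l) + 1 for l in lines[:k])
--     pref = [0]
--     t = 0
--     for line in lines:
--         t += len(line) + 1
--         pref.append(t)
--     groups = []
--     i = 0
--     while i < n:
--         # largest j in [i+1, n] with pref[j] - pref[i] - 1 <= max_chars (binary search);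
--         # j = i + 1 is always taken (the first line of a group is added unconditionally)
--         lo, hi = i + 1, n
--         while lo < hi:
--             mid = (lo + hi + 1) // 2
--             if pref[mid] - pref[i] - 1 <= max_chars:
--                 lo = mid
--             else:
--                 hi = mid - 1
--         j = lo
--         groups.append(lines[i:j])
--         if j >= n:
--             break
--         i = max(i + 1, j - max(0, overlap_items))
--     return groups
-- ===== Notes on version B (the rewrite author's own statement) =====
-- stated objective: faster
-- what changed: Replaces A's inner scan that rebuilds each overlapping window line by line with a one-pass prefix-sum array of line lengths plus a binary search for each window's end.
import Mathlib
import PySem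

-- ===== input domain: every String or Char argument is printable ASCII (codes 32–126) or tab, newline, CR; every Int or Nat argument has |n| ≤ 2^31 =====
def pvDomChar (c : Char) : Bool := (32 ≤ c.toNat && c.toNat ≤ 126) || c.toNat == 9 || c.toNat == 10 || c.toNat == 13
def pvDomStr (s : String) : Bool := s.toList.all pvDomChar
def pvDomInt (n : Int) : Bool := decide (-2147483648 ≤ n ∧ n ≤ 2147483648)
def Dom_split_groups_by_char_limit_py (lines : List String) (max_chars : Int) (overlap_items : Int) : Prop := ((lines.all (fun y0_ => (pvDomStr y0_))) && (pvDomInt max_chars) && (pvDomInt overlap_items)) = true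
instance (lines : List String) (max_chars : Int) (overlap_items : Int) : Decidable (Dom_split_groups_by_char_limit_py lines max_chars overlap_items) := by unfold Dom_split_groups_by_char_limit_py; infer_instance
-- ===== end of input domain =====

-- B replaces A's quadratic rebuild-the-window inner scan by prefix sums of line
-- lengths plus a binary search for each window end (objective: faster).

-- ===== PORT A =====
-- inner 'while j < len(lines)' loop of A; fuel bounds the iteration count
def pvAInner (lines : List String) (max_chars : Int) :
    Nat → List String → Int → Int → List String × Int × Int
  | 0, current, current_len, j => (current, current_len, j)
  | fuel+1, current, current_len, j =>
      if j < PySem.List.len lines then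
        let candidate := PySem.List.pyGetD lines j ""
        let add_len := PySem.Str.len candidate + (if current ≠ [] then 1 else 0)
        if current ≠ [] ∧ current_len + add_len > max_chars then
          (current, current_len, j)
        else
          pvAInner lines max_chars fuel (current ++ [candidate]) (current_len + add_len) (j + 1)
      else (current, current_len, j)

-- outer 'while i < len(lines)' loop of A
def pvAOuter (lines : List String) (max_chars overlap_items : Int) :
    Nat → List (List String) → Int → List (List String)
  | 0, groups, _ => groups
  | fuel+1, groups, i =>
      if i < PySem.List.len lines then
        let r := pvAInner lines max_chars (lines.length + 1) [] 0 i
        let current := r.1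
        let j := r.2.2
        let groups' := if current ≠ [] then groups ++ [current] else groups
        if j ≥ PySem.List.len lines then groups'
        else pvAOuter lines max_chars overlap_items fuel groups' (max (i + 1) (j - max 0 overlap_items))
      else groups

def split_groups_by_char_limit_py (lines : List String) (max_chars : Int) (overlap_items : Int) : List (List String) :=
  pvAOuter lines max_chars overlap_items (lines.length + 1) [] 0

-- ===== PORT B =====
-- 'pref = [0]; t = 0; for line in lines: t += len(line) + 1; pref.append(t)'
def pvBPref (lines : List String) : List Int :=
  (lines.foldl (fun (st : List Int × Int) line =>
      let t := st.2 + PySem.Str.len line + 1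
      (st.1 ++ [t], t)) ([0], 0)).1

-- 'while lo < hi: mid = (lo+hi+1)//2; if pref[mid]-pref[i]-1 <= max_chars: lo = mid else hi = mid-1'
def pvBSearch (pref : List Int) (i max_chars : Int) :
    Nat → Int → Int → Int
  | 0, lo, _ => lo
  | fuel+1, lo, hi =>
      if lo < hi then
        let mid := PySem.Int.floordiv (lo + hi + 1) 2
        if PySem.List.pyGetD pref mid 0 - PySem.List.pyGetD pref i 0 - 1 ≤ max_chars then
          pvBSearch pref i max_chars fuel mid hi
        else
          pvBSearch pref i max_chars fuel lo (mid - 1)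
      else lo

-- outer 'while i < n' loop of B
def pvBOuter (lines : List String) (max_chars overlap_items : Int) (pref : List Int) :
    Nat → List (List String) → Int → List (List String)
  | 0, groups, _ => groups
  | fuel+1, groups, i =>
      if i < PySem.List.len lines then
        let j := pvBSearch pref i max_chars (lines.length + 1) (i + 1) (PySem.List.len lines)
        let groups' := groups ++ [PySem.List.slice lines (some i) (some j)]
        if j ≥ PySem.List.len lines then groups'
        else pvBOuter lines max_chars overlap_items pref fuel groups' (max (i + 1) (j - max 0 overlap_items))
      else groups

def split_groups_by_char_limit_py_alt (lines : List String) (max_chars : Int) (overlap_items : Int) : List (List String) :=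
  pvBOuter lines max_chars overlap_items (pvBPref lines) (lines.length + 1) [] 0

-- ===== PRECONDITION & SPEC =====
def Spec_split_groups_by_char_limit_py (lines : List String) (max_chars : Int) (overlap_items : Int) (out : List (List String)) : Prop := out = split_groups_by_char_limit_py_alt lines max_chars overlap_items
instance (lines : List String) (max_chars : Int) (overlap_items : Int) (out : List (List String)) : Decidable (Spec_split_groups_by_char_limit_py lines max_chars overlap_items out) := by unfold Spec_split_groups_by_char_limit_py; infer_instance

-- ===== CLAIM (what is proved, stated in full; the proofs are below) =====
def Claim_equal_split_groups_by_char_limit_py : Prop := ∀ (lines : List String) (max_chars : Int) (overlap_items : Int), Dom_split_groups_by_char_limit_py lines max_chars overlap_items → Spec_split_groups_by_char_limit_py lines max_chars overlap_items (split_groups_by_char_limit_py lines max_chars overlap_items)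

-- ===== LEMMAS AND PROOFS =====

-- P lines k = sum of (len + 1) over the first k lines (the value pref[k] holds)
def pvP (lines : List String) (k : Nat) : Int :=
  ((lines.take k).map (fun s => PySem.Str.len s + 1)).sum

-- the window end A's inner loop reaches from start i
def pvE (lines : List String) (max_chars : Int) (i : Nat) : Nat :=
  max (i + 1)
    (Nat.findGreatest (fun e => pvP lines e - pvP lines i - 1 ≤ max_chars) lines.length)

theorem pvP_succ (lines : List String) (k : Nat) (hk : k < lines.length) :
    pvP lines (k + 1) = pvP lines k + (PySem.Str.len (lines.getD k "") + 1) := by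
  unfold pvP
  rw [List.take_add_one, List.map_append, List.sum_append, List.getElem?_eq_getElem hk]
  simp [List.getD_eq_getElem?_getD, List.getElem?_eq_getElem hk]

theorem pvP_mono (lines : List String) {j k : Nat} (h : j ≤ k) :
    pvP lines j ≤ pvP lines k := by
  induction k with
  | zero => simp [Nat.le_zero.mp h]
  | succ k ih =>
    rcases Nat.eq_or_lt_of_le h with rfl | h'
    · exact le_refl _
    · have hjk : j ≤ k := by omega
      rcases Nat.lt_or_ge k lines.length with hk | hk
      · have hs := pvP_succ lines k hk
        have hlen : (0:Int) ≤ PySem.Str.len (lines.getD k "") := by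
          simp [PySem.Str.len_eq]
        have := ih hjk
        omega
      · have heq : pvP lines (k+1) = pvP lines k := by
          unfold pvP
          rw [List.take_of_length_le (by omega), List.take_of_length_le hk]
        rw [heq]; exact ih hjk

theorem pvE_lb (lines : List String) (M : Int) (i : Nat) : i + 1 ≤ pvE lines M i :=
  le_max_left _ _

theorem pvE_ub (lines : List String) (M : Int) (i : Nat) (hi : i < lines.length) :
    pvE lines M i ≤ lines.length :=
  max_le (by omega) (Nat.findGreatest_le _)

theorem pvE_cond (lines : List String) (M : Int) (i : Nat) :
    pvE lines M i = i + 1 ∨ pvP lines (pvE lines M i) - pvP lines i - 1 ≤ M := by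
  rcases Nat.lt_or_ge (Nat.findGreatest (fun e => pvP lines e - pvP lines i - 1 ≤ M) lines.length) (i + 1) with h | h
  · left; unfold pvE; omega
  · right
    have hE : pvE lines M i = Nat.findGreatest (fun e => pvP lines e - pvP lines i - 1 ≤ M) lines.length := by
      unfold pvE; omega
    rw [hE]
    exact Nat.findGreatest_of_ne_zero (P := fun e => pvP lines e - pvP lines i - 1 ≤ M) (n := lines.length) rfl (by omega)

theorem pvE_stop (lines : List String) (M : Int) (i : Nat) (hi : i < lines.length) :
    pvE lines M i = lines.length ∨ ¬ (pvP lines (pvE lines M i + 1) - pvP lines i - 1 ≤ M) := by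
  by_cases hn : pvE lines M i = lines.length
  · exact Or.inl hn
  · right
    intro hc
    have hub := pvE_ub lines M i hi
    have h1 : pvE lines M i + 1 ≤ Nat.findGreatest (fun e => pvP lines e - pvP lines i - 1 ≤ M) lines.length :=
      Nat.le_findGreatest (P := fun e => pvP lines e - pvP lines i - 1 ≤ M) (n := lines.length) (by omega) hc
    have h2 : Nat.findGreatest (fun e => pvP lines e - pvP lines i - 1 ≤ M) lines.length ≤ pvE lines M i :=
      le_max_right _ _
    omega

theorem pvTake_ext (lines : List String) (i j : Nat) (hij : i ≤ j) (hj : j < lines.length) :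
    (lines.drop i).take (j - i) ++ [lines.getD j ""] = (lines.drop i).take (j + 1 - i) := by
  rw [show j + 1 - i = (j - i) + 1 by omega, List.take_add_one]
  congr 1
  rw [List.getElem?_drop, show i + (j - i) = j by omega, List.getElem?_eq_getElem hj]
  simp [List.getD_eq_getElem?_getD, List.getElem?_eq_getElem hj]

theorem pvAInner_run (lines : List String) (M : Int) (i : Nat) (hi : i < lines.length) :
    ∀ (fuel : Nat) (j : Nat), i < j → j ≤ lines.length → lines.length - j < fuel →
    (j = i + 1 ∨ pvP lines j - pvP lines i - 1 ≤ M) →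
    pvAInner lines M fuel ((lines.drop i).take (j - i)) (pvP lines j - pvP lines i - 1) (j : Int)
      = ((lines.drop i).take (pvE lines M i - i),
         pvP lines (pvE lines M i) - pvP lines i - 1, (pvE lines M i : Int)) := by
  intro fuel
  induction fuel with
  | zero => intro j _ _ h3 _; omega
  | succ fuel ih =>
    intro j h1 h2 h3 hc
    have hne : (lines.drop i).take (j - i) ≠ [] := by
      apply List.ne_nil_of_length_pos
      simp only [List.length_take, List.length_drop]
      omega
    by_cases hjn : j < lines.length
    · have hguard : ((j:Int) < PySem.List.len lines) := by
        simp only [PySem.List.len_eq]; exact_mod_cast hjn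
      have hgetd : PySem.List.pyGetD lines (j:Int) "" = lines.getD j "" := by simp
      have hif1 : (if (lines.drop i).take (j - i) ≠ [] then (1:Int) else 0) = 1 := if_pos hne
      have hsucc := pvP_succ lines j hjn
      simp only [pvAInner]
      rw [if_pos hguard, hgetd, hif1]
      by_cases hstop : pvP lines j - pvP lines i - 1 + (PySem.Str.len (lines.getD j "") + 1) > M
      · have hEj : pvE lines M i = j := by
          have hfg_le : Nat.findGreatest (fun e => pvP lines e - pvP lines i - 1 ≤ M) lines.length ≤ j := by
            by_contra hgt
            have hfgn : Nat.findGreatest (fun e => pvP lines e - pvP lines i - 1 ≤ M) lines.length ≤ lines.length :=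
              Nat.findGreatest_le _
            have hfg_cond : pvP lines (Nat.findGreatest (fun e => pvP lines e - pvP lines i - 1 ≤ M) lines.length) - pvP lines i - 1 ≤ M :=
              Nat.findGreatest_of_ne_zero (P := fun e => pvP lines e - pvP lines i - 1 ≤ M) (n := lines.length) rfl (by omega)
            have hmono := pvP_mono lines (show j + 1 ≤ Nat.findGreatest (fun e => pvP lines e - pvP lines i - 1 ≤ M) lines.length by omega)
            omega
          rcases hc with rfl | hcj
          · unfold pvE; omega
          · have hge : j ≤ Nat.findGreatest (fun e => pvP lines e - pvP lines i - 1 ≤ M) lines.length :=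
              Nat.le_findGreatest (P := fun e => pvP lines e - pvP lines i - 1 ≤ M) (n := lines.length) h2 hcj
            unfold pvE; omega
        rw [if_pos ⟨hne, hstop⟩, hEj]
      · rw [if_neg (fun hh => hstop hh.2)]
        have hext := pvTake_ext lines i j (by omega) hjn
        have harith : pvP lines j - pvP lines i - 1 + (PySem.Str.len (lines.getD j "") + 1)
            = pvP lines (j + 1) - pvP lines i - 1 := by omega
        have hcast : (j:Int) + 1 = ((j + 1 : Nat) : Int) := by push_cast; ring
        rw [hext, harith, hcast]
        exact ih (j + 1) (by omega) (by omega) (by omega) (Or.inr (by omega))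
    · have hjl : j = lines.length := by omega
      have hguard' : ¬ ((j:Int) < PySem.List.len lines) := by
        simp only [PySem.List.len_eq]; exact_mod_cast hjn
      simp only [pvAInner]
      rw [if_neg hguard']
      have hEn : pvE lines M i = j := by
        have hub := pvE_ub lines M i hi
        have hlb := pvE_lb lines M i
        rcases hc with rfl | hcj
        · omega
        · have hge : j ≤ Nat.findGreatest (fun e => pvP lines e - pvP lines i - 1 ≤ M) lines.length :=
            Nat.le_findGreatest (P := fun e => pvP lines e - pvP lines i - 1 ≤ M) (n := lines.length) (by omega) hcj
          have h2' : Nat.findGreatest (fun e => pvP lines e - pvP lines i - 1 ≤ M) lines.length ≤ pvE lines M i :=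
            le_max_right _ _
          omega
      rw [hEn]

theorem pvAInner_init (lines : List String) (M : Int) (i : Nat) (hi : i < lines.length)
    (fuel : Nat) (hfuel : lines.length - i < fuel) :
    pvAInner lines M fuel [] 0 (i : Int)
      = ((lines.drop i).take (pvE lines M i - i),
         pvP lines (pvE lines M i) - pvP lines i - 1, (pvE lines M i : Int)) := by
  cases fuel with
  | zero => omega
  | succ fuel =>
    have hguard : ((i:Int) < PySem.List.len lines) := by
      simp only [PySem.List.len_eq]; exact_mod_cast hi
    have hgetd : PySem.List.pyGetD lines (i:Int) "" = lines.getD i "" := by simp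
    have hif0 : (if ([] : List String) ≠ [] then (1:Int) else 0) = 0 := if_neg (by simp)
    simp only [pvAInner]
    rw [if_pos hguard, hgetd, hif0]
    rw [if_neg (by simp)]
    have hone : ([] : List String) ++ [lines.getD i ""] = (lines.drop i).take (i + 1 - i) := by
      have := pvTake_ext lines i i (le_refl i) hi
      simpa using this
    have harith : (0:Int) + (PySem.Str.len (lines.getD i "") + 0) = pvP lines (i + 1) - pvP lines i - 1 := by
      have := pvP_succ lines i hi; omega
    have hcast : (i:Int) + 1 = ((i + 1 : Nat) : Int) := by push_cast; ring
    rw [hone, harith, hcast]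
    exact pvAInner_run lines M i hi fuel (i + 1) (by omega) (by omega) (by omega) (Or.inl rfl)

-- pref characterization
def pvPartials : List String → Int → List Int
  | [], _ => []
  | s :: r, t => (t + PySem.Str.len s + 1) :: pvPartials r (t + PySem.Str.len s + 1)

theorem pvBPref_foldl : ∀ (ls : List String) (acc : List Int) (t : Int),
    (ls.foldl (fun (st : List Int × Int) line =>
      let t' := st.2 + PySem.Str.len line + 1
      (st.1 ++ [t'], t')) (acc, t)).1 = acc ++ pvPartials ls t := by
  intro ls
  induction ls with
  | nil => intro acc t; simp [pvPartials]
  | cons s r ih =>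
    intro acc t
    simp only [List.foldl, pvPartials]
    rw [ih]
    simp

theorem pvBPref_eq (lines : List String) : pvBPref lines = 0 :: pvPartials lines 0 := by
  unfold pvBPref
  rw [pvBPref_foldl]
  rfl

theorem pvPartials_getD : ∀ (ls : List String) (t : Int) (k : Nat), k < ls.length →
    (pvPartials ls t).getD k 0 = t + pvP ls (k + 1) := by
  intro ls
  induction ls with
  | nil => intro t k hk; simp at hk
  | cons s r ih =>
    intro t k hk
    cases k with
    | zero => simp [pvPartials, pvP]; omega
    | succ k =>
      have hk' : k < r.length := by simpa using hk
      simp only [pvPartials, List.getD_cons_succ]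
      rw [ih _ k hk']
      have : pvP (s :: r) (k + 2) = (PySem.Str.len s + 1) + pvP r (k + 1) := by
        simp [pvP, List.take_succ_cons]
      rw [this]
      omega

theorem pvPref_getD (lines : List String) (a : Nat) (hn : a ≤ lines.length) :
    PySem.List.pyGetD (pvBPref lines) (a : Int) 0 = pvP lines a := by
  rw [pvBPref_eq, PySem.List.pyGetD_natCast]
  cases a with
  | zero => simp [pvP]
  | succ k =>
    have hkl : k < lines.length := by omega
    rw [List.getD_cons_succ, pvPartials_getD lines 0 k hkl]
    omega

theorem pvBSearch_run (lines : List String) (M : Int) (i : Nat) (hi : i < lines.length) :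
    ∀ (fuel : Nat) (lo hi' : Int), (i:Int) + 1 ≤ lo → hi' ≤ lines.length →
    lo ≤ (pvE lines M i : Int) → (pvE lines M i : Int) ≤ hi' → (hi' - lo).toNat < fuel →
    pvBSearch (pvBPref lines) (i : Int) M fuel lo hi' = (pvE lines M i : Int) := by
  intro fuel
  induction fuel with
  | zero => intro lo hi' _ _ _ _ h5; omega
  | succ fuel ih =>
    intro lo hi' h1 h2 h3 h4 h5
    simp only [pvBSearch]
    by_cases hlt : lo < hi'
    · rw [if_pos hlt]
      have hmid2 : PySem.Int.floordiv (lo + hi' + 1) 2 = (lo + hi' + 1) / 2 :=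
        PySem.Int.floordiv_eq_ediv_of_pos (by omega)
      rw [hmid2]
      set mid := (lo + hi' + 1) / 2 with hmiddef
      have hmb : lo < mid ∧ mid ≤ hi' := by omega
      have hpi : PySem.List.pyGetD (pvBPref lines) (i:Int) 0 = pvP lines i :=
        pvPref_getD lines i (by omega)
      have hpm : PySem.List.pyGetD (pvBPref lines) mid 0 = pvP lines mid.toNat := by
        have h := pvPref_getD lines mid.toNat (by omega)
        rw [Int.toNat_of_nonneg (by omega)] at h
        exact h
      rw [hpm, hpi]
      have hEub := pvE_ub lines M i hi
      have hElb := pvE_lb lines M i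
      by_cases hcond : pvP lines mid.toNat - pvP lines i - 1 ≤ M
      · rw [if_pos hcond]
        have hmidE : mid ≤ (pvE lines M i : Int) := by
          by_contra hgt
          have hEn : pvE lines M i < lines.length := by omega
          have hE1 : pvE lines M i + 1 ≤ mid.toNat := by omega
          have hmn : mid.toNat ≤ lines.length := by omega
          have hmono := pvP_mono lines hE1
          rcases pvE_stop lines M i hi with h | h
          · omega
          · exact h (by omega)
        exact ih mid hi' (by omega) h2 hmidE h4 (by omega)
      · rw [if_neg hcond]
        have hmidE : (pvE lines M i : Int) ≤ mid - 1 := by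
          by_contra hgt
          have hmE : mid.toNat ≤ pvE lines M i := by omega
          have hEi2 : i + 2 ≤ pvE lines M i := by omega
          rcases pvE_cond lines M i with h | h
          · omega
          · have hmono := pvP_mono lines hmE
            exact hcond (by omega)
        exact ih lo (mid - 1) h1 (by omega) h3 hmidE (by omega)
    · rw [if_neg hlt]
      omega

theorem pvOuter_eq (lines : List String) (M ov : Int) :
    ∀ (fuel : Nat) (groups : List (List String)) (i : Nat),
    pvAOuter lines M ov fuel groups (i : Int) = pvBOuter lines M ov (pvBPref lines) fuel groups (i : Int) := by
  intro fuel
  induction fuel with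
  | zero => intro groups i; rfl
  | succ fuel ih =>
    intro groups i
    simp only [pvAOuter, pvBOuter]
    by_cases hig : ((i:Int) < PySem.List.len lines)
    · have hin : i < lines.length := by
        simp only [PySem.List.len_eq] at hig; exact_mod_cast hig
      rw [if_pos hig, if_pos hig]
      rw [pvAInner_init lines M i hin (lines.length + 1) (by omega)]
      rw [pvBSearch_run lines M i hin (lines.length + 1) ((i:Int) + 1) (PySem.List.len lines)
        (le_refl _) (by simp) (by exact_mod_cast pvE_lb lines M i)
        (by simp only [PySem.List.len_eq]; exact_mod_cast pvE_ub lines M i hin) (by simp; omega)]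
      have hEub := pvE_ub lines M i hin
      have hElb := pvE_lb lines M i
      have hcur : (lines.drop i).take (pvE lines M i - i) ≠ [] := by
        apply List.ne_nil_of_length_pos
        simp only [List.length_take, List.length_drop]
        omega
      have hslice : PySem.List.slice lines (some (i:Int)) (some ((pvE lines M i : Nat) : Int))
          = (lines.drop i).take (pvE lines M i - i) := PySem.List.slice_natCast lines i (pvE lines M i)
      simp only [hslice]
      rw [if_pos hcur]
      by_cases hj : ((pvE lines M i : Int) ≥ PySem.List.len lines)
      · rw [if_pos hj, if_pos hj]
      · rw [if_neg hj, if_neg hj]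
        have h0 : 0 ≤ max ((i:Int) + 1) ((pvE lines M i : Int) - max 0 ov) :=
          le_trans (by omega) (le_max_left _ _)
        rw [show max ((i:Int) + 1) ((pvE lines M i : Int) - max 0 ov)
            = (((max ((i:Int) + 1) ((pvE lines M i : Int) - max 0 ov)).toNat : Nat) : Int)
          from (Int.toNat_of_nonneg h0).symm]
        exact ih _ _
    · rw [if_neg hig, if_neg hig]

-- ===== VERDICT (by name: the statement is the Claim_ definition above) =====
theorem split_groups_by_char_limit_py_spec : Claim_equal_split_groups_by_char_limit_py := by
  intro lines max_chars overlap_items _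
  unfold Spec_split_groups_by_char_limit_py split_groups_by_char_limit_py split_groups_by_char_limit_py_alt
  have := pvOuter_eq lines max_chars overlap_items (lines.length + 1) [] 0
  simpa using this
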